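-- pv_equiv track=rewrite | github.com/Tyduss/One-Eval | one_eval/nodes/download_node.py | _pick_best_split
-- ===== SOURCE A (Python) =====
-- def _pick_best_split(splits: list[str], preferred: str) -> str:
--     if not splits:
--         return preferred
--     if preferred in splits:
--         return preferred
--     for cand in ("test", "validation", "dev", "val", "train"):
--         if cand in splits:
--             return cand
--     fuzzy = [s for s in splits if "test" in s.lower()]
--     if fuzzy:
--         return fuzzy[0]
--     fuzzy = [s for s in splits if "valid" in s.lower() or "dev" in s.lower()]
--     if fuzzy:
--         return fuzzy[0]
--     return splits[0]
-- ===== SOURCE B (Python) =====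
-- _CANDS = ("test", "validation", "dev", "val", "train")
--
--
-- def _pick_best_split(splits: list[str], preferred: str) -> str:
--     if not splits:
--         return preferred
--     if preferred in splits:
--         return preferred
--
--     def key(item):
--         i, s = item
--         if s in _CANDS:
--             return (0, _CANDS.index(s))
--         low = s.lower()
--         if "test" in low:
--             return (1, i)
--         if "valid" in low or "dev" in low:
--             return (2, i)
--         return (3, i)
--
--     return min(enumerate(splits), key=key)[1]
-- ===== Notes on version B (the rewrite author's own statement) =====
-- stated objective: alternative
-- what changed: A's sequence of scans (a candidate-priority loop over the list, then two fuzzy filter passes, then a positional fallback) is replaced by a single pass that takes the minimum of a (tier, subkey) priority key over enumerate(splits), with the two early guards kept.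
import Mathlib
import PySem

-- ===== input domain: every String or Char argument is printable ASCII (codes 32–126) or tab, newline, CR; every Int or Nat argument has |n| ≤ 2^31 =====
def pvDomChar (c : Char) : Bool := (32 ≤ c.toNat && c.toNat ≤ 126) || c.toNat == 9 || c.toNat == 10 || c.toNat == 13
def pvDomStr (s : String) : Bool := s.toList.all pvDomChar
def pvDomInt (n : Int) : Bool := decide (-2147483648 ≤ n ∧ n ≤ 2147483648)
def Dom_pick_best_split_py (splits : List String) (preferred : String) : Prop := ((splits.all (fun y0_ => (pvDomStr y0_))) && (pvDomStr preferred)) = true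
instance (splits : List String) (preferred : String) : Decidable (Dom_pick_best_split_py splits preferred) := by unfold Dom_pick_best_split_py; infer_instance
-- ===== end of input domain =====

-- B replaces A's sequence of scans (candidate loop, two fuzzy filters, fallback) by a single
-- pass taking the minimum of a (tier, subkey) priority key over enumerate(splits); alternative
-- decomposition, same result.

-- shared module-level helpers (the candidate tuple and the two fuzzy tests both Pythons use)
def pvCands : List String := ["test", "validation", "dev", "val", "train"]
def pvHasTest (s : String) : Bool := PySem.Str.isIn "test" (PySem.Str.lower s)
def pvHasValidDev (s : String) : Bool :=
  PySem.Str.isIn "valid" (PySem.Str.lower s) || PySem.Str.isIn "dev" (PySem.Str.lower s)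

-- ===== PORT A =====
-- 'for cand in ("test", "validation", "dev", "val", "train"): if cand in splits: return cand'
def pickCandLoop (splits : List String) : List String → Option String
  | [] => none
  | c :: rest => if splits.contains c then some c else pickCandLoop splits rest

def pick_best_split_py (splits : List String) (preferred : String) : String :=
  match splits with
  | [] => preferred                                   -- if not splits: return preferred
  | s0 :: _ =>
    if splits.contains preferred then preferred       -- if preferred in splits
    else
      match pickCandLoop splits pvCands with
      | some c => c
      | none =>
        match splits.filter pvHasTest with            -- fuzzy = [s for s in splits if "test" in s.lower()]
        | f :: _ => f
        | [] =>
          match splits.filter pvHasValidDev with      -- fuzzy = [... "valid" ... or "dev" ...]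
          | f :: _ => f
          | [] => s0                                  -- return splits[0]

-- ===== PORT B =====
-- key(item) = (tier, subkey): tuple key ported as the two components of min2?
def pvKey1 (p : Int × String) : Nat :=
  if pvCands.contains p.2 then 0
  else if pvHasTest p.2 then 1
  else if pvHasValidDev p.2 then 2
  else 3

def pvKey2 (p : Int × String) : Int :=
  if pvCands.contains p.2 then ((PySem.List.index? pvCands p.2).getD 0 : Nat)  -- _CANDS.index(s); guarded by the contains test, so never the default
  else p.1

def pick_best_split_py_alt (splits : List String) (preferred : String) : String :=
  if splits = [] then preferred
  else if splits.contains preferred then preferred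
  else
    match PySem.List.min2? (PySem.List.enumerate splits) pvKey1 pvKey2 with
    | some p => p.2                                   -- min(enumerate(splits), key=key)[1]
    | none => preferred                               -- unreachable: splits ≠ []

-- ===== PRECONDITION & SPEC =====
def Spec_pick_best_split_py (splits : List String) (preferred : String) (out : String) : Prop := out = pick_best_split_py_alt splits preferred
instance (splits : List String) (preferred : String) (out : String) : Decidable (Spec_pick_best_split_py splits preferred out) := by unfold Spec_pick_best_split_py; infer_instance

-- ===== CLAIM (what is proved, stated in full; the proofs are below) =====
def Claim_equal_pick_best_split_py : Prop := ∀ (splits : List String) (preferred : String), Dom_pick_best_split_py splits preferred → Spec_pick_best_split_py splits preferred (pick_best_split_py splits preferred)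

-- ===== LEMMAS AND PROOFS =====

-- Python's lexicographic strictly-less on the (tier, subkey) pair
def m2ltP {α : Type} (k1 : α → Nat) (k2 : α → Int) (x m : α) : Prop :=
  k1 x < k1 m ∨ (k1 x = k1 m ∧ k2 x < k2 m)

-- the step function of PySem.List.min2?, named, and its boolean test
def m2ltB {α : Type} (k1 : α → Nat) (k2 : α → Int) (x m : α) : Bool :=
  decide (k1 x < k1 m) || !decide (k1 m < k1 x) && decide (k2 x < k2 m)

def m2step {α : Type} (k1 : α → Nat) (k2 : α → Int) (acc : Option α) (x : α) : Option α :=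
  match acc with
  | none => some x
  | some m => if m2ltB k1 k2 x m then some x else some m

lemma min2?_eq_foldl_m2step {α : Type} (xs : List α) (k1 : α → Nat) (k2 : α → Int) :
    PySem.List.min2? xs k1 k2 = xs.foldl (m2step k1 k2) none := rfl

lemma m2ltB_iff {α : Type} (k1 : α → Nat) (k2 : α → Int) (x m : α) :
    m2ltB k1 k2 x m = true ↔ m2ltP k1 k2 x m := by
  simp only [m2ltB, m2ltP, Bool.or_eq_true, Bool.and_eq_true, Bool.not_eq_true',
    decide_eq_true_eq, decide_eq_false_iff_not]
  omega

lemma foldl_m2step_keep {α : Type} (k1 : α → Nat) (k2 : α → Int) (m : α) (l : List α)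
    (h : ∀ y ∈ l, ¬ m2ltP k1 k2 y m) :
    l.foldl (m2step k1 k2) (some m) = some m := by
  induction l with
  | nil => rfl
  | cons x t ih =>
    have hb : m2ltB k1 k2 x m = false := by
      have := h x (by simp)
      rw [← m2ltB_iff] at this
      simpa using this
    simp only [List.foldl_cons, m2step, hb, Bool.false_eq_true, if_false]
    exact ih (fun y hy => h y (by simp [hy]))

lemma foldl_m2step_mem {α : Type} (k1 : α → Nat) (k2 : α → Int) (l : List α) :
    ∀ (m : α), ∃ m', l.foldl (m2step k1 k2) (some m) = some m' ∧ (m' = m ∨ m' ∈ l) := by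
  induction l with
  | nil => exact fun m => ⟨m, rfl, Or.inl rfl⟩
  | cons x t ih =>
    intro m
    simp only [List.foldl_cons, m2step]
    cases hb : m2ltB k1 k2 x m with
    | true =>
      simp only [if_true]
      obtain ⟨m', hm', hc⟩ := ih x
      exact ⟨m', hm', by rcases hc with h | h <;> simp [h]⟩
    | false =>
      simp only [Bool.false_eq_true, if_false]
      obtain ⟨m', hm', hc⟩ := ih m
      exact ⟨m', hm', by rcases hc with h | h <;> simp [h]⟩

-- first-minimum characterisation: the fold returns w when everything before it is
-- strictly worse and nothing after it is strictly better
lemma min2?_eq_of_decomp {α : Type} (k1 : α → Nat) (k2 : α → Int) (pre : List α) (w : α)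
    (suf : List α)
    (hpre : ∀ y ∈ pre, m2ltP k1 k2 w y) (hsuf : ∀ y ∈ suf, ¬ m2ltP k1 k2 y w) :
    PySem.List.min2? (pre ++ w :: suf) k1 k2 = some w := by
  rw [min2?_eq_foldl_m2step, List.foldl_append]
  have hstepw : ∀ acc : Option α, (acc = none ∨ ∃ m ∈ pre, acc = some m) →
      m2step k1 k2 acc w = some w := by
    rintro acc (rfl | ⟨m, hm, rfl⟩)
    · rfl
    · simp only [m2step, (m2ltB_iff k1 k2 w m).2 (hpre m hm), if_true]
  have hacc : pre.foldl (m2step k1 k2) none = none ∨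
      ∃ m ∈ pre, pre.foldl (m2step k1 k2) none = some m := by
    cases pre with
    | nil => exact Or.inl rfl
    | cons x t =>
      obtain ⟨m', hm', hc⟩ := foldl_m2step_mem k1 k2 t x
      refine Or.inr ⟨m', ?_, by simpa using hm'⟩
      rcases hc with h | h <;> simp [h]
  rw [List.foldl_cons, hstepw _ hacc]
  exact foldl_m2step_keep k1 k2 w suf hsuf

-- lift the decomposition to enumerate: the pre/suf conditions only need the string
-- (pre) resp. the string and the fact that its index is larger (suf)
lemma min2?_enum_eq (sl : List String) (f : String) (sr : List String)
    (hpre : ∀ (j : Int) (s : String), s ∈ sl → m2ltP pvKey1 pvKey2 ((sl.length : Int), f) (j, s))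
    (hsuf : ∀ (j : Int) (s : String), s ∈ sr → (sl.length : Int) < j →
      ¬ m2ltP pvKey1 pvKey2 (j, s) ((sl.length : Int), f)) :
    PySem.List.min2? (PySem.List.enumerate (sl ++ f :: sr)) pvKey1 pvKey2 =
      some ((sl.length : Int), f) := by
  rw [show PySem.List.enumerate (sl ++ f :: sr) = PySem.List.enumerate (sl ++ f :: sr) 0 from rfl,
    PySem.List.enumerate_append, PySem.List.enumerate_cons]
  have h0 : (0 : Int) + (sl.length : Int) = (sl.length : Int) := by omega
  rw [h0]
  apply min2?_eq_of_decomp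
  · intro y hy
    rw [PySem.List.mem_enumerate_iff] at hy
    obtain ⟨k, hk, rfl⟩ := hy
    exact hpre _ _ (List.getElem_mem hk)
  · intro y hy
    rw [PySem.List.mem_enumerate_iff] at hy
    obtain ⟨k, hk, rfl⟩ := hy
    exact hsuf _ _ (List.getElem_mem hk) (by omega)

-- first-occurrence split of a member
lemma mem_split_first {α : Type} [DecidableEq α] (a : α) :
    ∀ (l : List α), a ∈ l → ∃ s t, l = s ++ a :: t ∧ a ∉ s := by
  intro l hl
  induction l with
  | nil => simp at hl
  | cons x t ih =>
    by_cases hx : a = x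
    · exact ⟨[], t, by simp [hx], by simp⟩
    · have : a ∈ t := by rcases List.mem_cons.1 hl with h | h; exact absurd h hx; exact h
      obtain ⟨s', t', hst, hns⟩ := ih this
      exact ⟨x :: s', t', by simp [hst], by simp [hns, hx]⟩

lemma index?_some_getElem {α : Type} [BEq α] [LawfulBEq α] (l : List α) (a : α) (k : Nat)
    (h : PySem.List.index? l a = some k) : ∃ hk : k < l.length, l[k] = a := by
  rw [PySem.List.index?_eq_some_iff] at h
  obtain ⟨pre, suf, rfl, rfl, -⟩ := h
  refine ⟨by simp, ?_⟩
  rw [List.getElem_append_right (le_refl _)]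
  simp

-- evaluation facts for the key of a non-candidate string
lemma pvKey1_not_cand (j : Int) (s : String) (h : pvCands.contains s = false) :
    1 ≤ pvKey1 (j, s) := by
  simp only [pvKey1, h, Bool.false_eq_true, if_false]
  split_ifs <;> omega

lemma pvKey2_not_cand (j : Int) (s : String) (h : pvCands.contains s = false) :
    pvKey2 (j, s) = j := by
  simp only [pvKey2, h, Bool.false_eq_true, if_false]

-- CASE 1: some candidate occurs literally; the minimum key is (0, index of the first such
-- candidate), achieved exactly at occurrences of that candidate
lemma case_cand (splits : List String) (c : String) (k : Nat)
    (hk : PySem.List.index? pvCands c = some k)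
    (hc : c ∈ splits)
    (hmin : ∀ s ∈ splits, ∀ k', PySem.List.index? pvCands s = some k' → k ≤ k') :
    ∃ j : Int, PySem.List.min2? (PySem.List.enumerate splits) pvKey1 pvKey2 = some (j, c) := by
  obtain ⟨sl, sr, rfl, hnsl⟩ := mem_split_first c splits hc
  refine ⟨(sl.length : Int), min2?_enum_eq sl c sr ?_ ?_⟩
  · -- strings before the first occurrence of c are strictly worse
    intro j s hs
    have hsmem : s ∈ sl ++ c :: sr := by simp [hs]
    have hcc : pvCands.contains c = true := by
      obtain ⟨hkl, hgc⟩ := index?_some_getElem _ _ _ hk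
      exact List.contains_iff_mem.2 (hgc ▸ List.getElem_mem hkl)
    have hwk1 : pvKey1 ((sl.length : Int), c) = 0 := by simp only [pvKey1, hcc, if_true]
    have hwk2 : pvKey2 ((sl.length : Int), c) = (k : Int) := by
      simp only [pvKey2, hcc, if_true, hk, Option.getD_some]
    by_cases hcs : pvCands.contains s = true
    · -- another literal candidate: its index in pvCands is strictly larger
      have hsmemC : s ∈ pvCands := List.contains_iff_mem.1 hcs
      obtain ⟨pre, suf, hdec, hnp⟩ := mem_split_first s pvCands hsmemC
      have hidx : PySem.List.index? pvCands s = some pre.length := by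
        rw [PySem.List.index?_eq_some_iff]; exact ⟨pre, suf, hdec, rfl, hnp⟩
      have hle : k ≤ pre.length := hmin s hsmem _ hidx
      have hne : s ≠ c := fun h => hnsl (h ▸ hs)
      have hlt : k < pre.length := by
        rcases lt_or_eq_of_le hle with h | h
        · exact h
        · exfalso
          obtain ⟨h1, e1⟩ := index?_some_getElem _ _ _ hk
          obtain ⟨h2, e2⟩ := index?_some_getElem _ _ _ hidx
          simp only [h] at e1
          exact hne (e2.symm.trans e1)
      have hk1 : pvKey1 (j, s) = 0 := by simp only [pvKey1, hcs, if_true]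
      have hk2 : pvKey2 (j, s) = (pre.length : Int) := by
        simp only [pvKey2, hcs, if_true, hidx, Option.getD_some]
      right; constructor
      · rw [hwk1, hk1]
      · rw [hwk2, hk2]; exact_mod_cast hlt
    · left
      rw [hwk1]
      exact lt_of_lt_of_le Nat.zero_lt_one (pvKey1_not_cand j s (by simpa using hcs))
  · -- nothing later beats the key (0, k)
    intro j s hs hj
    have hsmem : s ∈ sl ++ c :: sr := by simp [hs]
    have hcc : pvCands.contains c = true := by
      obtain ⟨hkl, hgc⟩ := index?_some_getElem _ _ _ hk
      exact List.contains_iff_mem.2 (hgc ▸ List.getElem_mem hkl)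
    have hwk1 : pvKey1 ((sl.length : Int), c) = 0 := by simp only [pvKey1, hcc, if_true]
    have hwk2 : pvKey2 ((sl.length : Int), c) = (k : Int) := by
      simp only [pvKey2, hcc, if_true, hk, Option.getD_some]
    intro hlt
    rcases hlt with h | ⟨he, h⟩
    · rw [hwk1] at h; omega
    · rw [hwk1] at he
      by_cases hcs : pvCands.contains s = true
      · have hsmemC : s ∈ pvCands := List.contains_iff_mem.1 hcs
        obtain ⟨pre, suf, hdec, hnp⟩ := mem_split_first s pvCands hsmemC
        have hidx : PySem.List.index? pvCands s = some pre.length := by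
          rw [PySem.List.index?_eq_some_iff]; exact ⟨pre, suf, hdec, rfl, hnp⟩
        have hle : k ≤ pre.length := hmin s hsmem _ hidx
        have hk2 : pvKey2 (j, s) = (pre.length : Int) := by
          simp only [pvKey2, hcs, if_true, hidx, Option.getD_some]
        rw [hk2, hwk2] at h
        omega
      · have := pvKey1_not_cand j s (by simpa using hcs)
        omega

-- CASE 2: no literal candidate, but some split fuzzy-matches "test": the minimum key is
-- (1, first such index)
lemma case_fuzzy_test (sl : List String) (f : String) (sr : List String)
    (hnc : ∀ s ∈ sl ++ f :: sr, pvCands.contains s = false)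
    (hslf : ∀ s ∈ sl, pvHasTest s = false) (hf : pvHasTest f = true) :
    PySem.List.min2? (PySem.List.enumerate (sl ++ f :: sr)) pvKey1 pvKey2 =
      some ((sl.length : Int), f) := by
  have hfc : pvCands.contains f = false := hnc f (by simp)
  have hwk1 : pvKey1 ((sl.length : Int), f) = 1 := by
    simp only [pvKey1, hfc, Bool.false_eq_true, if_false, hf, if_true]
  apply min2?_enum_eq
  · intro j s hs
    have hc : pvCands.contains s = false := hnc s (by simp [hs])
    left
    rw [hwk1]
    simp only [pvKey1, hc, Bool.false_eq_true, if_false, hslf s hs]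
    split_ifs <;> omega
  · intro j s hs hj hlt
    have hc : pvCands.contains s = false := hnc s (by simp [hs])
    have h2 : pvKey2 (j, s) = j := pvKey2_not_cand j s hc
    have h2w : pvKey2 ((sl.length : Int), f) = (sl.length : Int) :=
      pvKey2_not_cand _ f hfc
    have h1 : 1 ≤ pvKey1 (j, s) := pvKey1_not_cand j s hc
    rcases hlt with h | ⟨he, h⟩
    · rw [hwk1] at h; omega
    · rw [h2, h2w] at h; omega

-- CASE 3: no literal candidate, no "test" match, but a "valid"/"dev" match: key (2, first index)
lemma case_fuzzy_valid (sl : List String) (f : String) (sr : List String)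
    (hnc : ∀ s ∈ sl ++ f :: sr, pvCands.contains s = false)
    (hnt : ∀ s ∈ sl ++ f :: sr, pvHasTest s = false)
    (hslf : ∀ s ∈ sl, pvHasValidDev s = false) (hf : pvHasValidDev f = true) :
    PySem.List.min2? (PySem.List.enumerate (sl ++ f :: sr)) pvKey1 pvKey2 =
      some ((sl.length : Int), f) := by
  have hfc : pvCands.contains f = false := hnc f (by simp)
  have hwk1 : pvKey1 ((sl.length : Int), f) = 2 := by
    simp only [pvKey1, hfc, Bool.false_eq_true, if_false, hnt f (by simp), hf, if_true]
  apply min2?_enum_eq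
  · intro j s hs
    have hc : pvCands.contains s = false := hnc s (by simp [hs])
    left
    rw [hwk1]
    simp only [pvKey1, hc, Bool.false_eq_true, if_false, hnt s (by simp [hs]), hslf s hs]
    omega
  · intro j s hs hj hlt
    have hc : pvCands.contains s = false := hnc s (by simp [hs])
    have h1 : pvKey1 (j, s) = 2 ∨ pvKey1 (j, s) = 3 := by
      simp only [pvKey1, hc, Bool.false_eq_true, if_false, hnt s (by simp [hs])]
      split_ifs <;> simp
    rcases hlt with h | ⟨he, h⟩
    · rw [hwk1] at h; omega
    · rw [pvKey2_not_cand j s hc, pvKey2_not_cand _ f hfc] at h; omega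

-- CASE 4: every split is tier 3: the first split wins
lemma case_plain (s0 : String) (rest : List String)
    (hnc : ∀ s ∈ s0 :: rest, pvCands.contains s = false)
    (hnt : ∀ s ∈ s0 :: rest, pvHasTest s = false)
    (hnv : ∀ s ∈ s0 :: rest, pvHasValidDev s = false) :
    PySem.List.min2? (PySem.List.enumerate (s0 :: rest)) pvKey1 pvKey2 =
      some ((0 : Int), s0) := by
  have h := min2?_enum_eq [] s0 rest (by simp)
    (by
      intro j s hs hj hlt
      simp only [List.length_nil, Nat.cast_zero] at hj hlt
      have hk1 : pvKey1 (j, s) = 3 := by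
        simp only [pvKey1, hnc s (by simp [hs]), hnt s (by simp [hs]),
          hnv s (by simp [hs]), Bool.false_eq_true, if_false]
      have hk1w : pvKey1 ((0 : Int), s0) = 3 := by
        simp only [pvKey1, hnc s0 (by simp), hnt s0 (by simp), hnv s0 (by simp),
          Bool.false_eq_true, if_false]
      rcases hlt with h | ⟨he, h⟩
      · rw [hk1, hk1w] at h; omega
      · rw [pvKey2_not_cand j s (hnc s (by simp [hs])),
          pvKey2_not_cand _ s0 (hnc s0 (by simp))] at h
        omega)
  simpa using h

-- characterisation of A's candidate loop
lemma candLoop_none (splits : List String) :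
    ∀ cs : List String, pickCandLoop splits cs = none → ∀ c ∈ cs, splits.contains c = false := by
  intro cs
  induction cs with
  | nil => simp
  | cons x t ih =>
    intro h c hc
    simp only [pickCandLoop] at h
    cases hx : splits.contains x with
    | true => rw [hx, if_pos rfl] at h; cases h
    | false =>
      rw [hx] at h
      simp only [Bool.false_eq_true, if_false] at h
      rcases List.mem_cons.1 hc with rfl | hct
      · exact hx
      · exact ih h c hct

lemma candLoop_some (splits : List String) :
    ∀ cs : List String, ∀ c, pickCandLoop splits cs = some c →
      splits.contains c = true ∧
      ∃ pre suf, cs = pre ++ c :: suf ∧ ∀ c' ∈ pre, splits.contains c' = false := by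
  intro cs
  induction cs with
  | nil => simp [pickCandLoop]
  | cons x t ih =>
    intro c h
    simp only [pickCandLoop] at h
    cases hx : splits.contains x with
    | true =>
      rw [hx] at h
      simp only [if_true, Option.some.injEq] at h
      subst h
      exact ⟨hx, [], t, rfl, by simp⟩
    | false =>
      rw [hx] at h
      simp only [Bool.false_eq_true, if_false] at h
      obtain ⟨h1, pre, suf, hdec, hpre⟩ := ih c h
      exact ⟨h1, x :: pre, suf, by simp [hdec], by
        intro c' hc'
        rcases List.mem_cons.1 hc' with rfl | hct
        · exact hx
        · exact hpre c' hct⟩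

-- no candidate in splits → no split is a candidate
lemma no_cand_of_loop_none (splits : List String)
    (h : pickCandLoop splits pvCands = none) :
    ∀ s ∈ splits, pvCands.contains s = false := by
  intro s hs
  by_contra hc
  have hmem : s ∈ pvCands := List.contains_iff_mem.1 (by simpa using hc)
  have h1 := candLoop_none splits pvCands h s hmem
  have h2 := List.contains_iff_mem.2 hs
  rw [h2] at h1
  exact Bool.noConfusion h1

-- ===== VERDICT (by name: the statement is the Claim_ definition above) =====
theorem pick_best_split_py_spec : Claim_equal_pick_best_split_py := by
  intro splits preferred _
  unfold Spec_pick_best_split_py pick_best_split_py pick_best_split_py_alt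
  cases splits with
  | nil => rfl
  | cons s0 rest =>
    simp only [reduceCtorEq, if_false]
    by_cases hp : (s0 :: rest).contains preferred = true
    · simp only [hp, if_true]
    · simp only [Bool.not_eq_true] at hp
      simp only [hp, Bool.false_eq_true, if_false]
      cases hcl : pickCandLoop (s0 :: rest) pvCands with
      | some c =>
        obtain ⟨hc1, pre, suf, hdec, hpre⟩ := candLoop_some (s0 :: rest) pvCands c hcl
        have hcnp : c ∉ pre := by
          intro hmem
          have h3 := hpre c hmem
          rw [hc1] at h3
          exact Bool.noConfusion h3
        have hk : PySem.List.index? pvCands c = some pre.length := by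
          rw [PySem.List.index?_eq_some_iff]; exact ⟨pre, suf, hdec, rfl, hcnp⟩
        have hmin : ∀ s ∈ s0 :: rest, ∀ k',
            PySem.List.index? pvCands s = some k' → pre.length ≤ k' := by
          intro s hs k' hk'
          by_contra hlt
          rw [Nat.not_le] at hlt
          obtain ⟨hkl, hgel⟩ := index?_some_getElem _ _ _ hk'
          have hslt : k' < pre.length := hlt
          have hsp : s ∈ pre := by
            have h2 : s = pre[k']'hslt := by
              rw [← hgel, List.getElem_of_eq hdec hkl, List.getElem_append_left hslt]
            exact h2 ▸ List.getElem_mem hslt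
          have h3 := hpre s hsp
          have h4 := List.contains_iff_mem.2 hs
          rw [h4] at h3
          exact Bool.noConfusion h3
        obtain ⟨j, hj⟩ :=
          case_cand (s0 :: rest) c pre.length hk (List.contains_iff_mem.1 hc1) hmin
        rw [hj]
      | none =>
        have hnc := no_cand_of_loop_none (s0 :: rest) hcl
        cases hft : (s0 :: rest).filter pvHasTest with
        | cons f tl =>
          obtain ⟨sl, sr, hdec, hslf, hf, -⟩ := List.filter_eq_cons_iff.1 hft
          rw [hdec] at hnc ⊢
          rw [case_fuzzy_test sl f sr hnc
            (fun s hs => by simpa using hslf s hs) hf]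
        | nil =>
          have hnt : ∀ s ∈ s0 :: rest, pvHasTest s = false := by
            intro s hs
            simpa using List.filter_eq_nil_iff.1 hft s hs
          cases hfv : (s0 :: rest).filter pvHasValidDev with
          | cons f tl =>
            obtain ⟨sl, sr, hdec, hslf, hf, -⟩ := List.filter_eq_cons_iff.1 hfv
            rw [hdec] at hnc hnt ⊢
            rw [case_fuzzy_valid sl f sr hnc hnt
              (fun s hs => by simpa using hslf s hs) hf]
          | nil =>
            have hnv : ∀ s ∈ s0 :: rest, pvHasValidDev s = false := by
              intro s hs
              simpa using List.filter_eq_nil_iff.1 hfv s hs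
            rw [case_plain s0 rest hnc hnt hnv]
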